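-- pv_equiv track=rewrite | github.com/AinZolceffli/extra | sim_line.py | _cluster_arrivals
-- ===== SOURCE A (Python) =====
-- def _cluster_arrivals(arrival_times, max_gap=3):
-- 	"""
-- 	Group arrival times into clusters where vehicles arrive close together.
-- 	Returns list of (start_time, end_time) tuples for each cluster.
-- 	"""
-- 	if not arrival_times:
-- 		return []
--
-- 	sorted_arrivals = sorted(arrival_times)
-- 	clusters = []
-- 	cluster_start = sorted_arrivals[0]
-- 	cluster_end = sorted_arrivals[0]
--
-- 	for time in sorted_arrivals[1:]:
-- 		if time - cluster_end > max_gap: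
-- 			# Start a new cluster
-- 			clusters.append((cluster_start, cluster_end))
-- 			cluster_start = time
-- 		cluster_end = time
--
-- 	# Add the last cluster
-- 	clusters.append((cluster_start, cluster_end))
--
-- 	return clusters
-- ===== SOURCE B (Python) =====
-- def _cluster_arrivals(arrival_times, max_gap=3):
-- 	"""
-- 	Group arrival times into clusters where vehicles arrive close together.
-- 	Returns list of (start_time, end_time) tuples for each cluster.
-- 	"""
-- 	s = sorted(arrival_times)
-- 	if not s:
-- 		return []
-- 	# Boundary-based construction: a cluster starts at s[0] and after each
-- 	# break pair, and ends before each break pair and at s[-1].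
-- 	breaks = [(a, b) for a, b in zip(s, s[1:]) if b - a > max_gap]
-- 	starts = [s[0]] + [b for a, b in breaks]
-- 	ends = [a for a, b in breaks] + [s[-1]]
-- 	return list(zip(starts, ends))
-- ===== Notes on version B (the rewrite author's own statement) =====
-- stated objective: alternative
-- what changed: Replaces A's stateful single sweep (running cluster_start/cluster_end with append-on-break and a final append) by a boundary-based staged construction: collect the break pairs from adjacent pairs of the sorted list, build the starts list and the ends list independently from them, and zip the two lists into the clusters.
import Mathlib
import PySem

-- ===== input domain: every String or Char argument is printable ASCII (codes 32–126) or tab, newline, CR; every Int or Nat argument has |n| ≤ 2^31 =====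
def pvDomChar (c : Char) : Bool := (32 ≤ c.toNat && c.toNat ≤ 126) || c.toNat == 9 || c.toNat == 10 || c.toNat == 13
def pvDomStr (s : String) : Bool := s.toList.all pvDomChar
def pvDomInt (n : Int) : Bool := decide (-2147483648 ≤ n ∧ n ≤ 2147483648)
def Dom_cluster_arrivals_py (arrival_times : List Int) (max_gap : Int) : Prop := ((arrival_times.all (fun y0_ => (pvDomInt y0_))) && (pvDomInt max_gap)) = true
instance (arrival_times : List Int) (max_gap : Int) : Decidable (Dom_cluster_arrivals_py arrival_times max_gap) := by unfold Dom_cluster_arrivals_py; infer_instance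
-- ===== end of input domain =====

-- B replaces A's stateful sweep by a boundary-based construction: break pairs from
-- adjacent pairs, starts and ends built independently, then zipped; same cost.


-- ===== PORT A =====
def cluster_arrivals_py (arrival_times : List Int) (max_gap : Int) : List (Int × Int) :=
  if arrival_times = [] then []
  else
    match PySem.List.sorted arrival_times (fun x => x) false with
    | [] => []  -- unreachable: sorted of a nonempty list is nonempty
    | s0 :: rest =>
      let r := rest.foldl (fun (acc : List (Int × Int) × Int × Int) time =>
        if time - acc.2.2 > max_gap then (acc.1 ++ [(acc.2.1, acc.2.2)], time, time)
        else (acc.1, acc.2.1, time)) ([], s0, s0)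
      r.1 ++ [(r.2.1, r.2.2)]

-- ===== PORT B =====
def cluster_arrivals_py_alt (arrival_times : List Int) (max_gap : Int) : List (Int × Int) :=
  let s := PySem.List.sorted arrival_times (fun x => x) false
  match s with
  | [] => []
  | s0 :: _ =>
    -- zip(s, s[1:]) = s.zip s.tail; s[-1] on this nonempty list = getLastD
    let breaks := (s.zip s.tail).filter (fun p => decide (p.2 - p.1 > max_gap))
    let starts := s0 :: breaks.map Prod.snd
    let ends := breaks.map Prod.fst ++ [s.getLastD 0]
    starts.zip ends

-- ===== PRECONDITION & SPEC =====
def Spec_cluster_arrivals_py (arrival_times : List Int) (max_gap : Int) (out : List (Int × Int)) : Prop := out = cluster_arrivals_py_alt arrival_times max_gap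
instance (arrival_times : List Int) (max_gap : Int) (out : List (Int × Int)) : Decidable (Spec_cluster_arrivals_py arrival_times max_gap out) := by unfold Spec_cluster_arrivals_py; infer_instance

-- ===== CLAIM (what is proved, stated in full; the proofs are below) =====
def Claim_equal_cluster_arrivals_py : Prop := ∀ (arrival_times : List Int) (max_gap : Int), Dom_cluster_arrivals_py arrival_times max_gap → Spec_cluster_arrivals_py arrival_times max_gap (cluster_arrivals_py arrival_times max_gap)

-- ===== LEMMAS AND PROOFS =====

-- A's sweep from state (cl, st, en) with its trailing final append equals cl followed by
-- B's zip of starts and ends computed from the adjacent pairs of en :: rest.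
theorem loop_eq (g : Int) (rest : List Int) : ∀ (cl : List (Int × Int)) (st en : Int),
    (let r := rest.foldl (fun (acc : List (Int × Int) × Int × Int) time =>
        if time - acc.2.2 > g then (acc.1 ++ [(acc.2.1, acc.2.2)], time, time)
        else (acc.1, acc.2.1, time)) (cl, st, en);
      r.1 ++ [(r.2.1, r.2.2)])
    = cl ++ (st :: (((en :: rest).zip rest).filter (fun p => decide (p.2 - p.1 > g))).map Prod.snd).zip
              ((((en :: rest).zip rest).filter (fun p => decide (p.2 - p.1 > g))).map Prod.fst
               ++ [(en :: rest).getLastD 0]) := by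
  induction rest with
  | nil => intro cl st en; simp
  | cons t ts ih =>
    intro cl st en
    simp only [List.foldl_cons, List.zip_cons_cons, List.filter_cons]
    by_cases h : t - en > g
    · rw [if_pos h]
      have := ih (cl ++ [(st, en)]) t t
      simp only [this, decide_eq_true h]
      simp
    · rw [if_neg h]
      have := ih cl st t
      simp only [this, decide_eq_false h]
      simp

-- ===== VERDICT (by name: the statement is the Claim_ definition above) =====
theorem cluster_arrivals_py_spec : Claim_equal_cluster_arrivals_py := by
  intro xs g _
  unfold Spec_cluster_arrivals_py cluster_arrivals_py cluster_arrivals_py_alt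
  by_cases hx : xs = []
  · subst hx; simp [PySem.List.sorted]
  · rw [if_neg hx]
    cases hs : PySem.List.sorted xs (fun x => x) false with
    | nil =>
      exfalso
      have := PySem.List.length_sorted (xs := xs) (key := fun x => x) (rev := false)
      rw [hs] at this
      exact hx (List.eq_nil_of_length_eq_zero this.symm)
    | cons s0 rest =>
      dsimp only
      have := loop_eq g rest [] s0 s0
      simpa using this
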